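-- pv_equiv track=rewrite | github.com/JonasJore/coding-challenges | CodeWars/python/consecutiveLetters.py | solve
-- ===== SOURCE A (Python) =====
-- def solve(st):
--   if(len(st) == 1):
--     return True
--
--   sortedInput = ''.join(sorted(st))
--
--   for i in range(1, len(st)):
--     if ord(sortedInput[i]) - ord(sortedInput[i - 1]) != 1:
--       return False
--   return True
-- ===== SOURCE B (Python) =====
-- def solve(st):
--   n = len(st)
--   if n <= 1:
--     return True
--   chars = set(st)
--   return len(chars) == n and ord(max(chars)) - ord(min(chars)) == n - 1
-- ===== Notes on version B (the rewrite author's own statement) =====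
-- stated objective: faster
-- what changed: Replaces sort-then-adjacent-difference scan with a single pass: build the character set and check that all characters are distinct and max ord minus min ord equals len-1.
import Mathlib
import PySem

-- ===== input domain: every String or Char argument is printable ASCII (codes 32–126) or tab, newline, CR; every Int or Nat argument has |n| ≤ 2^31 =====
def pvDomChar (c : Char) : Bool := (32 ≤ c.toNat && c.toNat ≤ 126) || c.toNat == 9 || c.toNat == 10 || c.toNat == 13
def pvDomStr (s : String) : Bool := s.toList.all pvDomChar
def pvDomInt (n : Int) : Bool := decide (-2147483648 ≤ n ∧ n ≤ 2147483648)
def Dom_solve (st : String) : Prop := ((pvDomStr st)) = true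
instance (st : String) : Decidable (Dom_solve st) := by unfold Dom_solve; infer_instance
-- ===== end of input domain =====

-- B replaces A's sort + adjacent-difference scan by one pass: distinct chars and max ord - min ord = len - 1 (O(n) vs O(n log n)).

-- ===== PORT A =====
def solve (st : String) : Bool :=
  if PySem.Str.len st == 1 then true
  else
    let sortedInput := PySem.List.sorted st.toList (fun c => c) false
    (PySem.List.pyRange 1 (PySem.Str.len st) 1).all (fun i =>
      decide (((PySem.List.pyGetD sortedInput i ' ').toNat : Int)
            - ((PySem.List.pyGetD sortedInput (i - 1) ' ').toNat : Int) = 1))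

-- ===== PORT B =====
def solve_alt (st : String) : Bool :=
  let n := PySem.Str.len st
  if n ≤ 1 then true
  else
    let chars := PySem.Set.ofList st.toList
    (PySem.Set.len chars == n) &&
      (match PySem.List.max? chars (fun c => c), PySem.List.min? chars (fun c => c) with
       | some mx, some mn => decide ((mx.toNat : Int) - (mn.toNat : Int) = n - 1)
       | _, _ => false)

-- ===== PRECONDITION & SPEC =====
def Spec_solve (st : String) (out : Bool) : Prop := out = solve_alt st
instance (st : String) (out : Bool) : Decidable (Spec_solve st out) := by unfold Spec_solve; infer_instance

-- ===== CLAIM (what is proved, stated in full; the proofs are below) =====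
def Claim_equal_solve : Prop := ∀ (st : String), Dom_solve st → Spec_solve st (solve st)

-- ===== LEMMAS AND PROOFS =====

-- length of set(xs) equals length of xs iff xs has no duplicates
lemma pv_len_ofList_iff_nodup (xs : List Char) :
    (PySem.Set.ofList xs).length = xs.length ↔ xs.Nodup := by
  induction xs using List.reverseRecOn with
  | nil => simp [PySem.Set.ofList]
  | append_singleton xs x ih =>
    rw [PySem.Set.ofList_append_singleton]
    have h2 := PySem.Set.length_ofList_le xs
    by_cases hx : x ∈ xs
    · have h1 : PySem.Set.add (PySem.Set.ofList xs) x = PySem.Set.ofList xs := by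
        simp [PySem.Set.add, PySem.Set.contains, hx]
      rw [h1]
      apply iff_of_false
      · simp only [List.length_append, List.length_cons, List.length_nil]; omega
      · intro h; exact (List.disjoint_of_nodup_append h) hx (by simp)
    · have h1 : PySem.Set.add (PySem.Set.ofList xs) x = PySem.Set.ofList xs ++ [x] := by
        simp [PySem.Set.add, PySem.Set.contains, hx]
      rw [h1]
      simp only [List.length_append, List.length_cons, List.length_nil, Nat.zero_add]
      constructor
      · intro h
        exact (ih.1 (by omega)).append (List.nodup_singleton x)
          (List.disjoint_singleton.2 hx)
      · intro h
        have := ih.2 (List.nodup_append.1 h).1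
        omega

-- quantitative gap bound for a strictly increasing list of naturals
lemma pv_gap (u : List ℕ) (h : u.Pairwise (· < ·)) :
    ∀ j (hj : j < u.length), ∀ i (hi : i ≤ j), u[i]'(by omega) + (j - i) ≤ u[j] := by
  have hadj := List.pairwise_iff_getElem.1 h
  intro j
  induction j with
  | zero => intro hj i hi; interval_cases i; simp
  | succ j ih =>
    intro hj i hi
    rcases Nat.lt_or_ge i (j + 1) with hlt | hge
    · have h1 := ih (by omega) i (by omega)
      have h2 := hadj j (j + 1) (by omega) hj (by omega)
      omega
    · have : i = j + 1 := by omega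
      subst this; simp

-- sorted + nodup gives strictly increasing ords
lemma pv_strict (s : List Char) (hsort : s.Pairwise (· ≤ ·)) (hnd : s.Nodup) :
    (s.map Char.toNat).Pairwise (· < ·) := by
  rw [List.pairwise_map]
  have := List.Pairwise.and hsort hnd
  refine this.imp ?_
  rintro a b ⟨hle, hne⟩
  have : a < b := lt_of_le_of_ne hle hne
  exact Char.lt_def.1 this

-- every element of a ≤-sorted list is between its head and its last element
lemma pv_between (s : List Char) (hsort : s.Pairwise (· ≤ ·)) (hn : s ≠ [])
    (y : Char) (hy : y ∈ s) :
    s[0]'(by simp [List.length_pos_iff.2 hn]) ≤ y ∧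
    y ≤ s[s.length - 1]'(by have := List.length_pos_iff.2 hn; omega) := by
  have hlen := List.length_pos_iff.2 hn
  obtain ⟨j, hj, rfl⟩ := List.mem_iff_getElem.1 hy
  have hadj := List.pairwise_iff_getElem.1 hsort
  constructor
  · rcases Nat.eq_zero_or_pos j with rfl | hpos
    · exact le_refl _
    · exact hadj 0 j hlen hj hpos
  · rcases Nat.lt_or_ge j (s.length - 1) with hlt | hge
    · exact hadj j (s.length - 1) hj (by omega) hlt
    · have : j = s.length - 1 := by omega
      subst this; exact le_refl _

-- the core equivalence, on the ord list of the ≤-sorted list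
lemma pv_core (s : List Char) (hsort : s.Pairwise (· ≤ ·)) (hn : 1 ≤ s.length) :
    ((∀ i (hlt : i + 1 < s.length), (s[i + 1]'(by omega)).toNat = (s[i]'(by omega)).toNat + 1)
      ↔ (s.Nodup ∧ (s[0]'(by omega)).toNat + (s.length - 1) =
          (s[s.length - 1]'(by omega)).toNat)) := by
  constructor
  · intro hc
    have hall : ∀ i (hi : i < s.length), (s[i]'hi).toNat = (s[0]'(by omega)).toNat + i := by
      intro i
      induction i with
      | zero => simp
      | succ i ih =>
        intro hi
        have := hc i (by omega)
        have := ih (by omega)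
        omega
    constructor
    · -- strictly increasing toNat ⇒ nodup
      have hpw : (s.map Char.toNat).Pairwise (· < ·) := by
        rw [List.pairwise_iff_getElem]
        intro i j hi hj hij
        simp only [List.getElem_map]
        rw [hall i (by simpa using hi), hall j (by simpa using hj)]
        omega
      have := (List.pairwise_map (l := s) (f := Char.toNat) (R := (· ≠ ·))).1
        (hpw.imp fun h => Nat.ne_of_lt h)
      exact (this.imp fun h => fun he => h (by rw [he]))
    · have := hall (s.length - 1) (by omega)
      omega
  · rintro ⟨hnd, hsum⟩ i hi
    have hpw := pv_strict s hsort hnd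
    have hmaps : (s.map Char.toNat).length = s.length := by simp
    have hg1 := pv_gap _ hpw (i + 1) (by simp only [List.length_map]; omega) 0 (by omega)
    have hg2 := pv_gap _ hpw (s.length - 1) (by simp only [List.length_map]; omega) (i + 1) (by omega)
    have hg3 := pv_gap _ hpw (s.length - 1) (by simp only [List.length_map]; omega) i (by omega)
    have hg4 := pv_gap _ hpw i (by simp only [List.length_map]; omega) 0 (by omega)
    simp only [List.getElem_map] at hg1 hg2 hg3 hg4
    omega

theorem solve_eq_alt (st : String) : solve st = solve_alt st := by
  simp only [solve, solve_alt, PySem.Str.len_eq]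
  obtain ⟨l, hl⟩ : ∃ l, st.toList = l := ⟨_, rfl⟩
  simp only [hl]
  by_cases h2 : l.length ≤ 1
  · rcases Nat.le_one_iff_eq_zero_or_eq_one.1 h2 with h0 | h1
    · simp [h0, PySem.List.pyRange_one_eq_nil]
    · simp [h1]
  · rw [Nat.not_le] at h2
    have hne1 : (((l.length : Int)) == 1) = false := by simp; omega
    have hnle : ¬ ((l.length : Int) ≤ 1) := by omega
    rw [hne1]
    simp only [Bool.false_eq_true, if_false, if_neg hnle]
    set s := PySem.List.sorted l (fun c => c) false with hs
    have hslen : s.length = l.length := PySem.List.length_sorted l _ false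
    have hsp : s.Perm l := PySem.List.sorted_perm l _ false
    have hsort : s.Pairwise (· ≤ ·) := PySem.List.sorted_pairwise l (fun c => c)
    have hlne : l ≠ [] := by intro h; rw [h] at h2; simp at h2
    set chars := PySem.Set.ofList l with hch
    have hchne : chars ≠ [] := by
      intro h
      have := (PySem.Set.mem_ofList l (l.head hlne)).2 (List.head_mem hlne)
      rw [← hch, h] at this; simp at this
    obtain ⟨mx, hmax⟩ : ∃ mx, PySem.List.max? chars (fun c => c) = some mx := by
      cases hm : PySem.List.max? chars (fun c => c) with
      | none => exact absurd ((PySem.List.max?_eq_none_iff chars _).1 hm) hchne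
      | some mx => exact ⟨mx, rfl⟩
    obtain ⟨mn, hmin⟩ : ∃ mn, PySem.List.min? chars (fun c => c) = some mn := by
      cases hm : PySem.List.min? chars (fun c => c) with
      | none => exact absurd ((PySem.List.min?_eq_none_iff chars _).1 hm) hchne
      | some mn => exact ⟨mn, rfl⟩
    rw [hmax, hmin]
    have hmem : ∀ y : Char, y ∈ chars ↔ y ∈ s := by
      intro y; rw [hch, PySem.Set.mem_ofList, ← hsp.mem_iff]
    have hmxs : mx = s[s.length - 1]'(by omega) := by
      have h1 := (pv_between s hsort (by intro h; rw [h] at hslen; simp at hslen; omega) mx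
        ((hmem mx).1 (PySem.List.max?_mem hmax))).2
      have h2 := PySem.List.max?_isMax hmax (s[s.length - 1]'(by omega))
        ((hmem _).2 (List.getElem_mem _))
      exact le_antisymm h1 h2
    have hmns : mn = s[0]'(by omega) := by
      have h1 := (pv_between s hsort (by intro h; rw [h] at hslen; simp at hslen; omega) mn
        ((hmem mn).1 (PySem.List.min?_mem hmin))).1
      have h2 := PySem.List.min?_isMin hmin (s[0]'(by omega))
        ((hmem _).2 (List.getElem_mem _))
      exact le_antisymm h2 h1
    rw [Bool.eq_iff_iff]
    have hcore := pv_core s hsort (by omega)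
    have hndiff : l.Nodup ↔ s.Nodup := (hsp.nodup_iff).symm
    have hlenset : chars.length = l.length ↔ l.Nodup := pv_len_ofList_iff_nodup l
    constructor
    · intro hA
      have hall := List.all_eq_true.1 hA
      have hcons : ∀ k (hlt : k + 1 < s.length),
          (s[k + 1]'(by omega)).toNat = (s[k]'(by omega)).toNat + 1 := by
        intro k hk
        have hmem' : ((k + 1 : ℕ) : Int) ∈ PySem.List.pyRange 1 (l.length : Int) 1 := by
          rw [PySem.List.mem_pyRange_one]; exact ⟨by omega, by omega⟩
        have := hall _ hmem'
        rw [show ((k + 1 : ℕ) : Int) - 1 = ((k : ℕ) : Int) by push_cast; ring] at this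
        rw [PySem.List.pyGetD_eq_getElem s ' ' (by omega) (by omega),
            PySem.List.pyGetD_eq_getElem s ' ' (by omega) (by omega)] at this
        simp only [Int.toNat_natCast, decide_eq_true_eq] at this
        omega
      have hres := hcore.1 hcons
      simp only [Bool.and_eq_true, beq_iff_eq, decide_eq_true_eq]
      refine ⟨?_, ?_⟩
      · have hle : chars.length = l.length := hlenset.2 (hndiff.2 hres.1)
        simp only [PySem.Set.len, hle]
      · rw [hmxs, hmns]
        have := hres.2
        omega
    · intro hB
      simp only [Bool.and_eq_true, beq_iff_eq, decide_eq_true_eq] at hB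
      obtain ⟨hBlen, hBdiff⟩ := hB
      have hchl : chars.length = l.length := by
        simp only [PySem.Set.len] at hBlen; exact_mod_cast hBlen
      have hnd : s.Nodup := hndiff.1 (hlenset.1 hchl)
      rw [hmxs, hmns] at hBdiff
      have hcons := hcore.2 ⟨hnd, by omega⟩
      rw [List.all_eq_true]
      intro i hi
      rw [PySem.List.mem_pyRange_one] at hi
      obtain ⟨hi1, hi2⟩ := hi
      have hk : i = (((i.toNat - 1) + 1 : ℕ) : Int) := by omega
      rw [hk, show ((((i.toNat - 1) + 1 : ℕ)) : Int) - 1 = ((i.toNat - 1 : ℕ) : Int) by push_cast; ring]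
      rw [PySem.List.pyGetD_eq_getElem s ' ' (by omega) (by omega),
          PySem.List.pyGetD_eq_getElem s ' ' (by omega) (by omega)]
      simp only [Int.toNat_natCast, decide_eq_true_eq]
      have := hcons (i.toNat - 1) (by omega)
      omega

-- ===== VERDICT (by name: the statement is the Claim_ definition above) =====
theorem solve_spec : Claim_equal_solve := by
  intro st _
  unfold Spec_solve
  exact solve_eq_alt st
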